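-- pv_equiv track=rewrite | github.com/anian3/teoria_kompilacji | Mparser.py | matrix_division
-- ===== SOURCE A (Python) =====
-- def matrix_division(A, B):
--     if isinstance(A, list) and isinstance(B, list):
--         if len(A) != len(B) or len(A[0]) != len(B[0]):
--             raise ValueError("Dzielenie element po elemencie na różnych rozmiarach macierzy.")
--         for i in range(len(B)):
--             for j in range(len(B[0])):
--                 if B[i][j] == 0:
--                     raise ValueError("Dzielenie przez zero.")
--         return [[A[i][j] - B[i][j] for j in range(len(A[0]))] for i in range(len(A))]
--     else:
--         raise ValueError("Odejmowanie macierzowe wykonywane nie na macierzach.")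
-- ===== SOURCE B (Python) =====
-- def matrix_division(A, B):
--     if not (isinstance(A, list) and isinstance(B, list)):
--         raise ValueError("Odejmowanie macierzowe wykonywane nie na macierzach.")
--     if len(A) != len(B) or len(A[0]) != len(B[0]):
--         raise ValueError("Dzielenie element po elemencie na różnych rozmiarach macierzy.")
--     m = len(A[0])
--     flat = []
--     for ra, rb in zip(A, B):
--         for x, y in zip(ra, rb):
--             if y == 0:
--                 raise ValueError("Dzielenie przez zero.")
--             flat.append(x - y)
--     return [flat[i * m:(i + 1) * m] for i in range(len(A))]
-- ===== Notes on version B (the rewrite author's own statement) =====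
-- stated objective: alternative
-- what changed: Instead of A's two index-arithmetic passes (a full zero-scan of B, then a nested range-indexed comprehension), B streams the paired cells once into a single flat difference buffer and then reshapes that buffer into rows by slicing it at multiples of the row width.
-- outside the precondition, e.g. on matrix_division([[1], [2, 3], [4]], [[1], [1, 1], [1]]): A returns [[0], [1], [3]], B returns [[0], [1], [2]]
import Mathlib
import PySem

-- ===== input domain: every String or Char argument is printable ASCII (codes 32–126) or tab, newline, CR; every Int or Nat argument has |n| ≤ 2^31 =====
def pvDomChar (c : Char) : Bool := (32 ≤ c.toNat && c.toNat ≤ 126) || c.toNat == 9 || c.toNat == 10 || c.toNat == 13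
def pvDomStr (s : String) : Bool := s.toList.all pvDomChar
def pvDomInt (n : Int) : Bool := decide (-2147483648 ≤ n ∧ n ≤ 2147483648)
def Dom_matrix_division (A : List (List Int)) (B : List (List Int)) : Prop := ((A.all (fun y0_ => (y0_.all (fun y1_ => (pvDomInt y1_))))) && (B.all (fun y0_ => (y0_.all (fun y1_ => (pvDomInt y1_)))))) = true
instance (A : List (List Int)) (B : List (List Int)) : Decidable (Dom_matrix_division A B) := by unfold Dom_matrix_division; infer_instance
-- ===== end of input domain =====

-- B replaces A's two index-arithmetic passes (a full zero-scan of B, then a nested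
-- range-indexed comprehension) by one streaming pass that collects all cell
-- differences into a single flat buffer and then reshapes that buffer into rows by
-- slicing at multiples of the row width; same cost. Equivalence is about the
-- return value on Pre_ inputs.

-- ===== PORT A =====
-- the zero-scan loop of A either raises (excluded by Pre_) or has no effect, so it
-- contributes nothing to the returned value; the comprehension is ported literally.
def matrix_division (A : List (List Int)) (B : List (List Int)) : List (List Int) :=
  (PySem.List.pyRange 0 (A.length : Int) 1).map (fun i =>
    (PySem.List.pyRange 0 (((PySem.List.pyGetD A 0 []).length : Int)) 1).map (fun j =>
      PySem.List.pyGetD (PySem.List.pyGetD A i []) j 0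
        - PySem.List.pyGetD (PySem.List.pyGetD B i []) j 0))

-- ===== PORT B =====
def matrix_division_alt (A : List (List Int)) (B : List (List Int)) : List (List Int) :=
  let m := (PySem.List.pyGetD A 0 []).length
  let flat := (A.zip B).foldl
    (fun acc p => (p.1.zip p.2).foldl (fun a q => a ++ [q.1 - q.2]) acc) []
  (PySem.List.pyRange 0 (A.length : Int) 1).map (fun i =>
    PySem.List.slice flat (some (i * (m : Int))) (some ((i + 1) * (m : Int))))

-- ===== PRECONDITION & SPEC =====
-- Pre_ excludes inputs where A raises (size mismatch, empty A, a zero in B, short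
-- ragged rows → IndexError) and also ragged matrices with over-long rows, on which
-- A's restriction of the output to the accidental first-row width is an artefact
-- of its use of len(A[0]).
def Pre_matrix_division (A : List (List Int)) (B : List (List Int)) : Prop :=
  A ≠ [] ∧ A.length = B.length ∧
  (∀ r ∈ A, r.length = (A.headD []).length) ∧
  (∀ r ∈ B, r.length = (A.headD []).length) ∧
  (∀ r ∈ B, ∀ y ∈ r, y ≠ 0)
instance (A : List (List Int)) (B : List (List Int)) : Decidable (Pre_matrix_division A B) := by unfold Pre_matrix_division; infer_instance

def pvWitness_matrix_division : List (List Int) × List (List Int) :=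
  ([[1, 2], [3, 4]], [[1, 1], [2, 2]])

def Spec_matrix_division (A : List (List Int)) (B : List (List Int)) (out : List (List Int)) : Prop := out = matrix_division_alt A B
instance (A : List (List Int)) (B : List (List Int)) (out : List (List Int)) : Decidable (Spec_matrix_division A B out) := by unfold Spec_matrix_division; infer_instance

-- ===== CLAIM (what is proved, stated in full; the proofs are below) =====
def Claim_equal_matrix_division : Prop := ∀ (A : List (List Int)) (B : List (List Int)), Dom_matrix_division A B → Pre_matrix_division A B → Spec_matrix_division A B (matrix_division A B)

-- ===== LEMMAS AND PROOFS =====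

-- slicing the flattening of a list of m-length rows at [i*m, (i+1)*m) yields row i
theorem flatten_chunk {m : Nat} (L : List (List Int))
    (h : ∀ r ∈ L, r.length = m) :
    ∀ i, i < L.length → (L.flatten.drop (i * m)).take m = L[i]! := by
  induction L with
  | nil => intro i hi; simp at hi
  | cons r rs ih =>
    intro i hi
    cases i with
    | zero =>
      have hr : r.length = m := h r (List.mem_cons_self)
      simp [hr]
    | succ k =>
      have hr : r.length = m := h r (List.mem_cons_self)
      have := ih (fun r' hr' => h r' (List.mem_cons_of_mem _ hr')) k
        (by simpa using Nat.lt_of_succ_lt_succ hi)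
      have hdrop : ((r :: rs).flatten).drop ((k + 1) * m)
          = rs.flatten.drop (k * m) := by
        simp only [List.flatten_cons]
        rw [Nat.add_mul, one_mul, Nat.add_comm, ← hr,
          List.drop_length_add_append]
      rw [hdrop]
      simpa using this

-- ===== VERDICT (by name: the statement is the Claim_ definition above) =====
theorem matrix_division_spec : Claim_equal_matrix_division := by
  intro A B _ hpre
  obtain ⟨hA, hlen, hrA, hrB, _⟩ := hpre
  unfold Spec_matrix_division matrix_division matrix_division_alt
  simp only []
  set m := (PySem.List.pyGetD A 0 []).length with hm
  have h0 : PySem.List.pyGetD A (0 : Int) [] = A.headD [] := by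
    cases A with
    | nil => simp at hA
    | cons a as => exact PySem.List.pyGetD_natCast (a :: as) 0 []
  have hmhead : m = (A.headD []).length := by rw [hm, h0]
  -- the flat buffer is the flattening of the row-wise difference matrix
  set rows := (A.zip B).map (fun p => (p.1.zip p.2).map (fun q => q.1 - q.2)) with hrows
  have hflat : (A.zip B).foldl
      (fun acc p => (p.1.zip p.2).foldl (fun a q => a ++ [q.1 - q.2]) acc) []
      = rows.flatten := by
    have hstep : ∀ (acc : List Int) (p : List Int × List Int), p ∈ A.zip B →
        (p.1.zip p.2).foldl (fun a q => a ++ [q.1 - q.2]) acc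
        = acc ++ (p.1.zip p.2).map (fun q => q.1 - q.2) := by
      intro acc p _
      exact PySem.List.foldl_append_singleton_eq_map _ _ _
    rw [PySem.List.foldl_congr_mem (A.zip B)
      (fun acc p => (p.1.zip p.2).foldl (fun a q => a ++ [q.1 - q.2]) acc)
      (fun acc (p : List Int × List Int) => acc ++ (p.1.zip p.2).map (fun q => q.1 - q.2))
      [] hstep,
      PySem.List.foldl_append_eq_flatMap, hrows, List.flatMap_def]
    simp
  have hrowlen : ∀ r ∈ rows, r.length = m := by
    intro r hr
    rw [hrows] at hr
    obtain ⟨p, hp, rfl⟩ := List.mem_map.mp hr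
    obtain ⟨hpa, hpb⟩ := List.of_mem_zip hp
    simp [List.length_zip, hrA _ hpa, hrB _ hpb, hmhead]
  have hrowslen : rows.length = A.length := by
    simp [hrows, List.length_zip, hlen]
  apply List.ext_getElem
  · simp [PySem.List.length_pyRange_one]
  · intro i h1 h2
    have hiA : i < A.length := by
      simp [PySem.List.length_pyRange_one] at h1; exact h1
    have hiB : i < B.length := hlen ▸ hiA
    have hirows : i < rows.length := hrowslen ▸ hiA
    simp only [List.getElem_map, PySem.List.getElem_pyRange_one, zero_add]
    rw [hflat]
    -- slice with natural bounds
    have hb : ((i : Int) + 1) * (m : Int) = (((i + 1) * m : Nat) : Int) := by push_cast; ring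
    have ha : (i : Int) * (m : Int) = ((i * m : Nat) : Int) := by push_cast; ring
    rw [ha, hb]
    have hslice : PySem.List.slice rows.flatten (some ((i * m : Nat) : Int))
        (some (((i + 1) * m : Nat) : Int))
        = (rows.flatten.drop (i * m)).take ((i + 1) * m - i * m) := by
      exact PySem.List.slice_natCast _ _ _
    rw [hslice]
    have hmm : (i + 1) * m - i * m = m := by
      rw [Nat.add_mul, one_mul]; omega
    rw [hmm]
    have hchunk := flatten_chunk rows hrowlen i hirows
    rw [hchunk, List.getElem!_eq_getElem?_getD, List.getElem?_eq_getElem hirows]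
    -- now: rows[i] = A-port's i-th row
    simp only [Option.getD_some, hrows, List.getElem_map, List.getElem_zip]
    have hAi : PySem.List.pyGetD A (i : Int) [] = A[i] := by
      rw [PySem.List.pyGetD_natCast]; simp [List.getD, hiA]
    have hBi : PySem.List.pyGetD B (i : Int) [] = B[i] := by
      rw [PySem.List.pyGetD_natCast]; simp [List.getD, hiB]
    rw [hAi, hBi]
    have hlA : A[i].length = (A.headD []).length := hrA _ (List.getElem_mem hiA)
    have hlB : B[i].length = (A.headD []).length := hrB _ (List.getElem_mem hiB)
    apply List.ext_getElem
    · simp [PySem.List.length_pyRange_one, List.length_zip, hlA, hlB, hmhead]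
    · intro j j1 j2
      have hj : j < (A.headD []).length := by
        simp [PySem.List.length_pyRange_one] at j1
        omega
      simp only [List.getElem_map, PySem.List.getElem_pyRange_one, zero_add,
        List.getElem_zip]
      rw [PySem.List.pyGetD_natCast, PySem.List.pyGetD_natCast]
      simp [List.getD, hlA ▸ hj, hlB ▸ hj]
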